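-- pv_equiv track=rewrite | github.com/SaladQueen999/NoteMyPad | TentorPåCanvas/Tenta25/längstaSträngen.py | find_longest_pos
-- ===== SOURCE A (Python) =====
-- def find_longest_pos(lista):
--     indexOfLongest = 0
--     longest = 0
--     for i in range(len(lista)):
--         if len(lista[i]) >= longest:
--             longest = len(lista[i])
--             indexOfLongest = i
--     return indexOfLongest
-- ===== SOURCE B (Python) =====
-- def find_longest_pos(lista):
--     maxlen = 0
--     for s in lista:
--         if len(s) > maxlen:
--             maxlen = len(s)
--     result = 0
--     for i in range(len(lista)):
--         if len(lista[i]) == maxlen: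
--             result = i
--     return result
-- ===== Notes on version B (the rewrite author's own statement) =====
-- stated objective: alternative
-- what changed: B decomposes the single running-best loop into two passes: first compute the maximum length with a strict comparison, then scan for the last index whose length equals that maximum; A's empty-list 0 and last-on-ties fall out naturally.
import Mathlib
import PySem

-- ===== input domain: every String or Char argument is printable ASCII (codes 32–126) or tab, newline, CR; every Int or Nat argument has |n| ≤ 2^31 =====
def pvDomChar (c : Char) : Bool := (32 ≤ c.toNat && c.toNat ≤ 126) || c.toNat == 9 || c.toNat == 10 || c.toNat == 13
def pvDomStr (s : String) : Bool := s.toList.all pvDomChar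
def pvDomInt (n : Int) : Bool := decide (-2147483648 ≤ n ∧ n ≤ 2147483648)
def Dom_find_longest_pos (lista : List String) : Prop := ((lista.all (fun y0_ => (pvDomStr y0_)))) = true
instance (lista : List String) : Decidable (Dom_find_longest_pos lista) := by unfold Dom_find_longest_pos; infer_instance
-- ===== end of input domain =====

-- B replaces A's single running-best loop by two passes (max length, then last index attaining it); same cost, different decomposition.

-- ===== PORT A =====
def find_longest_pos (lista : List String) : Int :=
  (lista.zipIdx.foldl
    (fun (st : Int × Int) (p : String × Nat) =>
      if (p.1.length : Int) ≥ st.2 then ((p.2 : Int), (p.1.length : Int)) else st)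
    (0, 0)).1

-- ===== PORT B =====
def find_longest_pos_alt (lista : List String) : Int :=
  let maxlen : Int :=
    lista.foldl (fun m s => if (s.length : Int) > m then (s.length : Int) else m) 0
  lista.zipIdx.foldl
    (fun (r : Int) (p : String × Nat) =>
      if (p.1.length : Int) = maxlen then (p.2 : Int) else r) 0

-- ===== PRECONDITION & SPEC =====
def Spec_find_longest_pos (lista : List String) (out : Int) : Prop := out = find_longest_pos_alt lista
instance (lista : List String) (out : Int) : Decidable (Spec_find_longest_pos lista out) := by unfold Spec_find_longest_pos; infer_instance

-- ===== CLAIM (what is proved, stated in full; the proofs are below) =====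
def Claim_equal_find_longest_pos : Prop := ∀ (lista : List String), Dom_find_longest_pos lista → Spec_find_longest_pos lista (find_longest_pos lista)

-- ===== LEMMAS AND PROOFS =====

def pvB1 (l : List String) (m : Int) : Int :=
  l.foldl (fun m s => if (s.length : Int) > m then (s.length : Int) else m) m

-- the first pass's result is either its seed or attained by some element
lemma pvB1_attained (l : List String) (m : Int) :
    pvB1 l m = m ∨ ∃ x ∈ l, (x.length : Int) = pvB1 l m := by
  induction l generalizing m with
  | nil => left; rfl
  | cons s t ih =>
    have h : pvB1 (s :: t) m = pvB1 t (if (s.length : Int) > m then (s.length : Int) else m) := rfl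
    rcases ih (if (s.length : Int) > m then (s.length : Int) else m) with h1 | ⟨x, hx, hxe⟩
    · rw [h, h1]
      split
      · right; exact ⟨s, by simp, rfl⟩
      · left; rfl
    · right; exact ⟨x, by simp [hx], by rw [h]; exact hxe⟩

-- the first pass never decreases below its seed
lemma pvB1_ge (l : List String) (m : Int) : m ≤ pvB1 l m := by
  induction l generalizing m with
  | nil => exact le_refl m
  | cons s t ih =>
    have h : pvB1 (s :: t) m = pvB1 t (if (s.length : Int) > m then (s.length : Int) else m) := rfl
    have h2 := ih (if (s.length : Int) > m then (s.length : Int) else m)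
    rw [h]
    by_cases hc : (s.length : Int) > m
    · simp only [hc, if_true] at h2 ⊢; omega
    · simp only [hc, if_false] at h2 ⊢; exact h2

-- the second pass ignores its seed once some element attains M
lemma pvB2_indep (l : List String) (M : Int) (h : ∃ x ∈ l, (x.length : Int) = M) :
    ∀ (n : Nat) (i j : Int),
      (l.zipIdx n).foldl (fun r p => if (p.1.length : Int) = M then (p.2 : Int) else r) i =
      (l.zipIdx n).foldl (fun r p => if (p.1.length : Int) = M then (p.2 : Int) else r) j := by
  induction l with
  | nil => simp at h
  | cons s t ih =>
    intro n i j
    simp only [List.zipIdx_cons, List.foldl_cons]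
    by_cases hs : (s.length : Int) = M
    · simp [hs]
    · rcases h with ⟨x, hx, hxe⟩
      rcases List.mem_cons.mp hx with rfl | hxt
      · exact absurd hxe hs
      · simp only [hs, if_false]
        exact ih ⟨x, hxt, hxe⟩ (n + 1) i j

-- main invariant relating A's single fold to B's two passes
lemma pvMain (l : List String) :
    ∀ (n : Nat) (long idx : Int),
      long ≤ pvB1 l long →
      (l.zipIdx n).foldl
        (fun (st : Int × Int) (p : String × Nat) =>
          if (p.1.length : Int) ≥ st.2 then ((p.2 : Int), (p.1.length : Int)) else st)
        (idx, long)
      = (((l.zipIdx n).foldl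
            (fun r p => if (p.1.length : Int) = pvB1 l long then (p.2 : Int) else r) idx),
         pvB1 l long) := by
  induction l with
  | nil => intro n long idx _; rfl
  | cons s t ih =>
    intro n long idx _
    simp only [List.zipIdx_cons, List.foldl_cons]
    have hB1 : pvB1 (s :: t) long
        = pvB1 t (if (s.length : Int) > long then (s.length : Int) else long) := rfl
    by_cases hge : (s.length : Int) ≥ long
    · simp only [hge, if_true]
      have hseed : (if (s.length : Int) > long then (s.length : Int) else long)
          = (s.length : Int) := by
        split
        · rfl
        · omega
      have hB1' : pvB1 (s :: t) long = pvB1 t (s.length : Int) := by rw [hB1, hseed]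
      have hle : (s.length : Int) ≤ pvB1 t (s.length : Int) := pvB1_ge t (s.length : Int)
      have := ih (n + 1) (s.length : Int) (n : Int) hle
      rw [this, hB1']
      by_cases hs : (s.length : Int) = pvB1 t (s.length : Int)
      · rw [if_pos hs]
      · have hatt : ∃ x ∈ t, (x.length : Int) = pvB1 t (s.length : Int) := by
          rcases pvB1_attained t (s.length : Int) with h1 | h2
          · exact absurd h1.symm hs
          · exact h2
        simp only [hs, if_false]
        rw [pvB2_indep t _ hatt (n + 1) (n : Int) idx]
    · simp only [hge, if_false]
      have hlt : (s.length : Int) < long := by omega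
      have hseed : (if (s.length : Int) > long then (s.length : Int) else long) = long := by
        split
        · omega
        · rfl
      have hB1' : pvB1 (s :: t) long = pvB1 t long := by rw [hB1, hseed]
      have hle : long ≤ pvB1 t long := pvB1_ge t long
      have := ih (n + 1) long idx hle
      rw [this, hB1']
      have hs : ¬ (s.length : Int) = pvB1 t long := by
        have := pvB1_ge t long
        omega
      simp [hs]

-- ===== VERDICT (by name: the statement is the Claim_ definition above) =====
theorem find_longest_pos_spec : Claim_equal_find_longest_pos := by
  intro lista _
  unfold Spec_find_longest_pos find_longest_pos find_longest_pos_alt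
  rw [pvMain lista 0 0 0 (pvB1_ge lista 0)]
  rfl
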